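-- pv_equiv track=rewrite | github.com/grotyx/research-graphDB | scripts/consolidate_entities.py | generate_alias_suggestions
-- ===== SOURCE A (Python) =====
-- def generate_alias_suggestions(
--     classified: list[dict],
--     entity_type: str,
-- ) -> str:
--     """분류 결과를 entity_normalizer.py에 추가할 코드 스니펫으로 변환.
--
--     병합 대상으로 분류된 항목들을 canonical별로 그룹화하여
--     복사-붙여넣기 가능한 Python 코드 문자열을 생성합니다.
--
--     Args:
--         classified: batch_classify() 결과
--         entity_type: "intervention" | "outcome" | "pathology"
--
--     Returns:
--         복사-붙여넣기 가능한 Python 코드 문자열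
--     """
--     merge_items = [c for c in classified if c["action"] == "merge"]
--     if not merge_items:
--         return f"# No merge candidates for {entity_type.upper()}_ALIASES"
--
--     # canonical별 그룹화
--     by_canonical: dict[str, list[str]] = {}
--     for item in merge_items:
--         by_canonical.setdefault(item["canonical"], []).append(item["name"])
--
--     lines = [
--         f"# Auto-suggested aliases for {entity_type.upper()}_ALIASES",
--         f"# Generated by consolidate_entities.py",
--         f"# Review each suggestion before adding to entity_normalizer.py",
--         "",
--     ]
--
--     for canonical, aliases in sorted(by_canonical.items()):
--         lines.append(f'"{canonical}": [')
--         lines.append(f'    ...,  # existing aliases')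
--         for alias in sorted(aliases):
--             lines.append(f'    "{alias}",  # NEW (auto-classified)')
--         lines.append('],')
--
--     return "\n".join(lines)
-- ===== SOURCE B (Python) =====
-- def generate_alias_suggestions(
--     classified: list[dict],
--     entity_type: str,
-- ) -> str:
--     """Same snippet as A, built by a sort-then-groupby pass: no grouping dict,
--     no per-canonical re-sorting -- one lexicographic sort of (canonical, name)
--     pairs, then a single linear sweep that opens/closes blocks as the canonical
--     changes."""
--     merge_items = [c for c in classified if c["action"] == "merge"]
--     if not merge_items:
--         return f"# No merge candidates for {entity_type.upper()}_ALIASES"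
--
--     pairs = sorted((item["canonical"], item["name"]) for item in merge_items)
--
--     out = [
--         f"# Auto-suggested aliases for {entity_type.upper()}_ALIASES",
--         f"# Generated by consolidate_entities.py",
--         f"# Review each suggestion before adding to entity_normalizer.py",
--         "",
--     ]
--     prev = None
--     for canonical, name in pairs:
--         if canonical != prev:
--             if prev is not None:
--                 out.append('],')
--             out.append(f'"{canonical}": [')
--             out.append(f'    ...,  # existing aliases')
--             prev = canonical
--         out.append(f'    "{name}",  # NEW (auto-classified)')
--     out.append('],')
--
--     return "\n".join(out)
-- ===== Notes on version B (the rewrite author's own statement) =====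
-- stated objective: alternative
-- what changed: B replaces A's by_canonical grouping dict and per-group re-sort by one lexicographic sort of (canonical, name) pairs followed by a single groupby-style sweep that opens/closes a block whenever the canonical changes.
-- outside the precondition, e.g. on generate_alias_suggestions([{'canonical': 'a', 'name': 'b'}], 'x'): A raises KeyError, B raises KeyError
import Mathlib
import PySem

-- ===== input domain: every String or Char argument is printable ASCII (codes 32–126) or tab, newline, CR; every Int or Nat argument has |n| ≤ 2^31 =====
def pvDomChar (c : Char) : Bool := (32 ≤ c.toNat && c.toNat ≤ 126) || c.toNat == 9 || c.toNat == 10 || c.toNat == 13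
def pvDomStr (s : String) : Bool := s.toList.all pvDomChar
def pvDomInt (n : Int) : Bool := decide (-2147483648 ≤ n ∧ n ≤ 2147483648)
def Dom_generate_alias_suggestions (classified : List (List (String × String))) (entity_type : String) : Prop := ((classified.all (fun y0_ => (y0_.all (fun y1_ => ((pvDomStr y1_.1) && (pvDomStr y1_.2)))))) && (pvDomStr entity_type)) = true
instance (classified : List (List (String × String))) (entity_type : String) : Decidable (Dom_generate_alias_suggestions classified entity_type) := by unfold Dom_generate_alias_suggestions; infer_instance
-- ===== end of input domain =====

-- B replaces A's grouping dict + per-group sorts by one lexicographic sort of (canonical, name)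
-- pairs and a single groupby sweep (objective: alternative). Return-value equivalence only.

-- ===== PORT A =====
-- d[k] on a dict passed in as an association list: first match (none = KeyError)
def pyKey? (d : List (String × String)) (k : String) : Option String :=
  (d.find? (fun p => p.1 == k)).map (·.2)

-- d[k] where Pre_ guarantees the key is present
def pyKeyD (d : List (String × String)) (k : String) : String :=
  (pyKey? d k).getD ""

def generate_alias_suggestions (classified : List (List (String × String))) (entity_type : String) : String :=
  let merge_items := classified.filter (fun c => pyKey? c "action" == some "merge")
  if merge_items = [] then
    "# No merge candidates for " ++ PySem.Str.upper entity_type ++ "_ALIASES"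
  else
    let by_canonical : PySem.Dict String (List String) :=
      merge_items.foldl
        (fun d item => d.modify (pyKeyD item "canonical") [] (fun l => l ++ [pyKeyD item "name"]))
        PySem.Dict.empty
    let lines : List String :=
      ["# Auto-suggested aliases for " ++ PySem.Str.upper entity_type ++ "_ALIASES",
       "# Generated by consolidate_entities.py",
       "# Review each suggestion before adding to entity_normalizer.py",
       ""]
    -- sorted(by_canonical.items()): dict keys are unique, so Python's tuple comparison is
    -- decided by the key alone — sorting by the first component is exact here
    let lines :=
      (PySem.List.sorted by_canonical.items (fun p => p.1) false).foldl
        (fun lines p =>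
          ((PySem.List.sorted p.2 (fun a => a) false).foldl
            (fun ls a_ => ls ++ ["    \"" ++ a_ ++ "\",  # NEW (auto-classified)"])
            ((lines ++ ["\"" ++ p.1 ++ "\": ["]) ++ ["    ...,  # existing aliases"]))
          ++ ["],"])
        lines
    PySem.Str.join "\n" lines

-- ===== PORT B =====
-- one step of B's sweep: state = (emitted lines, previously seen canonical)
def pvSweepStep (acc : List String × Option String) (p : String × String) :
    List String × Option String :=
  let acc :=
    if acc.2 = some p.1 then acc
    else
      ((if acc.2 = none then acc.1 else acc.1 ++ ["],"])
         ++ ["\"" ++ p.1 ++ "\": [", "    ...,  # existing aliases"],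
       some p.1)
  (acc.1 ++ ["    \"" ++ p.2 ++ "\",  # NEW (auto-classified)"], acc.2)

def generate_alias_suggestions_alt (classified : List (List (String × String))) (entity_type : String) : String :=
  let merge_items := classified.filter (fun c => pyKey? c "action" == some "merge")
  if merge_items = [] then
    "# No merge candidates for " ++ PySem.Str.upper entity_type ++ "_ALIASES"
  else
    -- sorted(...) on the (canonical, name) tuples: Python's lexicographic tuple order
    let pairs :=
      PySem.List.sorted2
        (merge_items.map (fun item => (pyKeyD item "canonical", pyKeyD item "name")))
        (fun p => p.1) (fun p => p.2) false
    let out : List String :=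
      ["# Auto-suggested aliases for " ++ PySem.Str.upper entity_type ++ "_ALIASES",
       "# Generated by consolidate_entities.py",
       "# Review each suggestion before adding to entity_normalizer.py",
       ""]
    let st := pairs.foldl pvSweepStep (out, none)
    PySem.Str.join "\n" (st.1 ++ ["],"])

-- ===== PRECONDITION & SPEC =====
-- Pre_ excludes exactly the inputs where Python A raises KeyError: a record without an
-- "action" key, or a record classified "merge" without a "canonical" or "name" key.
def Pre_generate_alias_suggestions (classified : List (List (String × String))) (entity_type : String) : Prop :=
  ∀ c ∈ classified, "action" ∈ c.map Prod.fst ∧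
    ((c.find? (fun p => p.1 == "action")).map Prod.snd = some "merge" →
      "canonical" ∈ c.map Prod.fst ∧ "name" ∈ c.map Prod.fst)

instance (classified : List (List (String × String))) (entity_type : String) : Decidable (Pre_generate_alias_suggestions classified entity_type) := by unfold Pre_generate_alias_suggestions; infer_instance

def pvWitness_generate_alias_suggestions : (List (List (String × String))) × String :=
  ([[("action", "merge"), ("canonical", "vitamin d"), ("name", "vit d")],
    [("action", "keep")]], "intervention")

def Spec_generate_alias_suggestions (classified : List (List (String × String))) (entity_type : String) (out : String) : Prop := out = generate_alias_suggestions_alt classified entity_type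
instance (classified : List (List (String × String))) (entity_type : String) (out : String) : Decidable (Spec_generate_alias_suggestions classified entity_type out) := by unfold Spec_generate_alias_suggestions; infer_instance

-- ===== CLAIM (what is proved, stated in full; the proofs are below) =====
def Claim_equal_generate_alias_suggestions : Prop := ∀ (classified : List (List (String × String))) (entity_type : String), Dom_generate_alias_suggestions classified entity_type → Pre_generate_alias_suggestions classified entity_type → Spec_generate_alias_suggestions classified entity_type (generate_alias_suggestions classified entity_type)

-- ===== LEMMAS AND PROOFS =====

-- Python's '<' on (str, str) tuples, as sorted2 compares with keys fst/snd
def pvLexLt (a b : String × String) : Bool :=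
  decide (a.1 < b.1) || (!decide (b.1 < a.1) && decide (a.2 < b.2))

-- characterizations of pvLexLt as order propositions
theorem pvLexLt_false_iff (a b : String × String) :
    pvLexLt a b = false ↔ ¬ a.1 < b.1 ∧ (b.1 < a.1 ∨ ¬ a.2 < b.2) := by
  simp only [pvLexLt, Bool.or_eq_false_iff, Bool.and_eq_false_iff, Bool.not_eq_false',
    decide_eq_false_iff_not, decide_eq_true_eq]

theorem pvLexLt_true_iff (a b : String × String) :
    pvLexLt a b = true ↔ a.1 < b.1 ∨ (¬ b.1 < a.1 ∧ a.2 < b.2) := by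
  simp only [pvLexLt, Bool.or_eq_true, Bool.and_eq_true, Bool.not_eq_true',
    decide_eq_true_eq, decide_eq_false_iff_not]

theorem pvLexLt_asymm {a b : String × String} (h : pvLexLt a b = true) : pvLexLt b a = false := by
  rw [pvLexLt_true_iff] at h
  rw [pvLexLt_false_iff]
  rcases h with h1 | ⟨h1, h2⟩
  · exact ⟨asymm h1, Or.inl h1⟩
  · exact ⟨h1, Or.inr (asymm h2)⟩

theorem pvLexLt_negtrans {x y z : String × String}
    (h1 : pvLexLt z y = false) (h2 : pvLexLt x y = true) : pvLexLt z x = false := by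
  rw [pvLexLt_false_iff] at h1
  rw [pvLexLt_true_iff] at h2
  rw [pvLexLt_false_iff]
  obtain ⟨hzy, hd⟩ := h1
  rcases h2 with hxy | ⟨hyx, hxy2⟩
  · refine ⟨fun hzx => hzy (hzx.trans hxy), Or.inl ?_⟩
    exact lt_of_lt_of_le hxy (le_of_not_gt hzy)
  · refine ⟨fun hzx => hzy (lt_of_lt_of_le hzx (le_of_not_gt hyx)), ?_⟩
    rcases hd with hy1 | hny
    · exact Or.inl (lt_of_le_of_lt (le_of_not_gt hyx) hy1)
    · exact Or.inr fun hzx2 => hny (hzx2.trans hxy2)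

theorem pvLexLt_antisymm {a b : String × String}
    (h1 : pvLexLt a b = false) (h2 : pvLexLt b a = false) : a = b := by
  rw [pvLexLt_false_iff] at h1 h2
  obtain ⟨hab, hr1⟩ := h1
  obtain ⟨hba, hr2⟩ := h2
  have e1 : a.1 = b.1 := le_antisymm (le_of_not_gt hba) (le_of_not_gt hab)
  have hr1' : ¬ a.2 < b.2 := by
    rcases hr1 with h | h
    · exact absurd h hba
    · exact h
  have hr2' : ¬ b.2 < a.2 := by
    rcases hr2 with h | h
    · exact absurd h hab
    · exact h
  exact Prod.ext e1 (le_antisymm (le_of_not_gt hr2') (le_of_not_gt hr1'))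

-- "a ≤ b" in Python's tuple order
def pvLe (a b : String × String) : Prop := pvLexLt b a = false

theorem pairwise_insertBy (x : String × String) (ys : List (String × String))
    (h : ys.Pairwise pvLe) : (PySem.List.insertBy pvLexLt x ys).Pairwise pvLe := by
  induction ys with
  | nil => simp [PySem.List.insertBy, List.pairwise_cons]
  | cons y ys ih =>
    rw [List.pairwise_cons] at h
    obtain ⟨hy, hys⟩ := h
    cases hxy : pvLexLt x y with
    | true =>
      have : PySem.List.insertBy pvLexLt x (y :: ys) = x :: y :: ys := by
        simp [PySem.List.insertBy, hxy]
      rw [this, List.pairwise_cons, List.pairwise_cons]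
      refine ⟨?_, hy, hys⟩
      intro z hz
      rcases List.mem_cons.1 hz with rfl | hz
      · exact pvLexLt_asymm hxy
      · exact pvLexLt_negtrans (hy z hz) hxy
    | false =>
      have : PySem.List.insertBy pvLexLt x (y :: ys) = y :: PySem.List.insertBy pvLexLt x ys := by
        simp [PySem.List.insertBy, hxy]
      rw [this, List.pairwise_cons]
      refine ⟨?_, ih hys⟩
      intro z hz
      rcases (PySem.List.mem_insertBy pvLexLt x z ys).1 hz with rfl | hz
      · exact hxy
      · exact hy z hz

theorem pairwise_foldl_insertBy (xs : List (String × String)) (acc : List (String × String))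
    (h : acc.Pairwise pvLe) :
    (xs.foldl (fun acc x => PySem.List.insertBy pvLexLt x acc) acc).Pairwise pvLe := by
  induction xs generalizing acc with
  | nil => exact h
  | cons x xs ih => exact ih _ (pairwise_insertBy x acc h)

-- uniqueness of Python's tuple sort: any pvLe-sorted rearrangement IS sorted2
theorem sorted2_eq_of_perm_of_pairwise (xs ys : List (String × String))
    (hp : ys.Perm xs) (hs : ys.Pairwise pvLe) :
    PySem.List.sorted2 xs (fun p => p.1) (fun p => p.2) false = ys := by
  have hfold : PySem.List.sorted2 xs (fun p => p.1) (fun p => p.2) false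
      = xs.foldl (fun acc x => PySem.List.insertBy pvLexLt x acc) [] := rfl
  refine List.Perm.eq_of_pairwise (le := pvLe) ?_ ?_ hs
    (((PySem.List.sorted2_perm xs _ _ false).trans hp.symm))
  · exact fun a b _ _ h1 h2 => pvLexLt_antisymm h2 h1
  · rw [hfold]; exact pairwise_foldl_insertBy xs [] List.Pairwise.nil

-- the line constructors shared by both snippets
def pvAlias (n : String) : String := "    \"" ++ n ++ "\",  # NEW (auto-classified)"
def pvOpen (c : String) (ns : List String) : List String :=
  ("\"" ++ c ++ "\": [") :: "    ...,  # existing aliases" :: ns.map pvAlias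

-- ---- the grouped form of the sorted pair list ----

theorem pvFlatMapCongr {α β : Type} (l : List α) (f g : α → List β)
    (h : ∀ a ∈ l, f a = g a) : l.flatMap f = l.flatMap g := by
  induction l with
  | nil => rfl
  | cons x l ih =>
    rw [List.flatMap_cons, List.flatMap_cons, h x List.mem_cons_self,
      ih fun a ha => h a (List.mem_cons_of_mem x ha)]

theorem pvFlatMapPerm {α β : Type} (l : List α) (f g : α → List β)
    (h : ∀ a ∈ l, (f a).Perm (g a)) : (l.flatMap f).Perm (l.flatMap g) := by
  induction l with
  | nil => exact List.Perm.refl _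
  | cons x l ih =>
    rw [List.flatMap_cons, List.flatMap_cons]
    exact (h x List.mem_cons_self).append (ih fun a ha => h a (List.mem_cons_of_mem x ha))

theorem grp_perm_filter (qs : List (String × String)) (c : String) :
    ((PySem.List.sorted ((qs.filter (fun p => p.1 == c)).map Prod.snd) (fun a => a) false).map
      (fun n => (c, n))).Perm (qs.filter (fun p => p.1 == c)) := by
  refine ((PySem.List.sorted_perm _ _ _).map _).trans ?_
  rw [List.map_map]
  have : ∀ p ∈ qs.filter (fun p => p.1 == c), ((fun n => (c, n)) ∘ Prod.snd) p = p := by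
    intro p hp
    have := List.of_mem_filter hp
    have h1 : p.1 = c := by simpa using this
    simp [Function.comp, ← h1]
  rw [List.map_congr_left this]
  simp

theorem flatMap_filter_perm (qs : List (String × String)) (cs : List String)
    (hnd : cs.Nodup) (hcov : ∀ p ∈ qs, p.1 ∈ cs) :
    (cs.flatMap (fun c => qs.filter (fun p => p.1 == c))).Perm qs := by
  induction cs generalizing qs with
  | nil =>
    have : qs = [] := by
      cases qs with
      | nil => rfl
      | cons q qs => exact absurd (hcov q (List.mem_cons_self)) (List.not_mem_nil)
    simp [this]
  | cons c cs ih =>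
    rw [List.flatMap_cons]
    have hcs : ∀ c' ∈ cs, qs.filter (fun p => p.1 == c') =
        (qs.filter (fun p => !(p.1 == c))).filter (fun p => p.1 == c') := by
      intro c' hc'
      rw [List.filter_filter]
      refine (List.filter_congr ?_).symm
      intro p _
      cases hcne : (p.1 == c') with
      | false => simp
      | true =>
        have : p.1 = c' := by simpa using hcne
        have hne : c' ≠ c := fun h => (List.nodup_cons.1 hnd).1 (h ▸ hc')
        simp [this, hne]
    have hflat : cs.flatMap (fun c' => qs.filter (fun p => p.1 == c'))
        = cs.flatMap (fun c' => (qs.filter (fun p => !(p.1 == c))).filter (fun p => p.1 == c')) :=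
      pvFlatMapCongr cs _ _ hcs
    rw [hflat]
    refine (List.Perm.append_left _ (ih (qs.filter (fun p => !(p.1 == c)))
      (List.nodup_cons.1 hnd).2 ?_)).trans (List.filter_append_perm _ qs)
    intro p hp
    have hpq : p ∈ qs := List.mem_of_mem_filter hp
    have hpc : ¬ p.1 = c := by simpa using List.of_mem_filter hp
    rcases List.mem_cons.1 (hcov p hpq) with h | h
    · exact absurd h hpc
    · exact h

-- the grouped pair list is pvLe-sorted
theorem pairwise_grouped (qs : List (String × String)) :
    ((PySem.List.sorted (PySem.Set.ofList (qs.map Prod.fst)) (fun x => x) false).flatMap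
      (fun c => ((PySem.List.sorted ((qs.filter (fun p => p.1 == c)).map Prod.snd)
          (fun a => a) false).map (fun n => (c, n))))).Pairwise pvLe := by
  rw [List.pairwise_flatMap]
  constructor
  · intro c _
    rw [List.pairwise_map]
    refine (PySem.List.sorted_pairwise _ _).imp ?_
    intro n1 n2 h
    rw [pvLe, pvLexLt_false_iff]
    exact ⟨lt_irrefl _, Or.inr (not_lt.2 h)⟩
  · refine (PySem.List.sorted_ofList_pairwise_lt _).imp ?_
    intro c1 c2 hlt x hx y hy
    obtain ⟨n1, _, rfl⟩ := List.mem_map.1 hx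
    obtain ⟨n2, _, rfl⟩ := List.mem_map.1 hy
    rw [pvLe, pvLexLt_false_iff]
    exact ⟨asymm hlt, Or.inl hlt⟩

-- B's sorted2 call, in grouped form
theorem sorted2_grouped (qs : List (String × String)) :
    PySem.List.sorted2 qs (fun p => p.1) (fun p => p.2) false
    = (PySem.List.sorted (PySem.Set.ofList (qs.map Prod.fst)) (fun x => x) false).flatMap
        (fun c => ((PySem.List.sorted ((qs.filter (fun p => p.1 == c)).map Prod.snd)
            (fun a => a) false).map (fun n => (c, n)))) := by
  refine sorted2_eq_of_perm_of_pairwise _ _ ?_ (pairwise_grouped qs)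
  have h1 : ∀ c ∈ PySem.List.sorted (PySem.Set.ofList (qs.map Prod.fst)) (fun x => x) false,
      ((PySem.List.sorted ((qs.filter (fun p => p.1 == c)).map Prod.snd)
        (fun a => a) false).map (fun n => (c, n))).Perm (qs.filter (fun p => p.1 == c)) :=
    fun c _ => grp_perm_filter qs c
  refine (pvFlatMapPerm _ _ _ h1).trans (flatMap_filter_perm qs _ ?_ ?_)
  · exact ((PySem.List.sorted_perm _ _ _).nodup_iff).2 (PySem.Set.nodup_ofList _)
  · intro p hp
    rw [PySem.List.mem_sorted, PySem.Set.mem_ofList]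
    exact List.mem_map_of_mem hp

-- ---- B's sweep, characterised ----

theorem sweep_names (c : String) (ns : List String) (out : List String) :
    (ns.map (fun n => (c, n))).foldl pvSweepStep (out, some c)
    = (out ++ ns.map pvAlias, some c) := by
  induction ns generalizing out with
  | nil => simp
  | cons n ns ih =>
    rw [List.map_cons, List.foldl_cons]
    have hstep : pvSweepStep (out, some c) (c, n) = (out ++ [pvAlias n], some c) := by
      simp [pvSweepStep, pvAlias]
    rw [hstep, ih]
    simp

theorem sweep_group (c : String) (ns : List String) (out : List String) (prev : Option String)
    (hne : prev ≠ some c) (hns : ns ≠ []) :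
    (ns.map (fun n => (c, n))).foldl pvSweepStep (out, prev)
    = (out ++ (if prev = none then [] else ["],"]) ++ pvOpen c ns, some c) := by
  cases ns with
  | nil => exact absurd rfl hns
  | cons n ns =>
    rw [List.map_cons, List.foldl_cons]
    have hstep : pvSweepStep (out, prev) (c, n)
        = ((if prev = none then out else out ++ ["],"])
            ++ ["\"" ++ c ++ "\": [", "    ...,  # existing aliases"] ++ [pvAlias n], some c) := by
      simp [pvSweepStep, hne, pvAlias]
    rw [hstep, sweep_names]
    cases prev <;> simp [pvOpen]

theorem sweep_from_some (nsOf : String → List String) (cs : List String) (d : String)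
    (out : List String) (hns : ∀ c ∈ cs, nsOf c ≠ []) (hd : ∀ c ∈ cs, d ≠ c)
    (hpair : cs.Pairwise (· ≠ ·)) :
    (cs.flatMap (fun c => (nsOf c).map (fun n => (c, n)))).foldl pvSweepStep (out, some d)
    = (out ++ cs.flatMap (fun c => "]," :: pvOpen c (nsOf c)), some (cs.getLastD d)) := by
  induction cs generalizing d out with
  | nil => simp
  | cons c cs ih =>
    rw [List.flatMap_cons, List.foldl_append]
    have h1 := sweep_group c (nsOf c) out (some d)
      (fun h => hd c List.mem_cons_self (Option.some.inj h)) (hns c List.mem_cons_self)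
    rw [h1, if_neg (by simp)]
    rw [ih c _ (fun c' hc' => hns c' (List.mem_cons_of_mem c hc'))
      (fun c' hc' => (List.pairwise_cons.1 hpair).1 c' hc') (List.pairwise_cons.1 hpair).2]
    simp [List.append_assoc]
    rw [← List.getLastD_eq_getLast?, ← List.getLastD_eq_getLast?, List.getLastD_cons]

theorem sweep_from_none (nsOf : String → List String) (c : String) (cs : List String)
    (out : List String) (hns : ∀ c' ∈ c :: cs, nsOf c' ≠ []) (hpair : (c :: cs).Pairwise (· ≠ ·)) :
    ((c :: cs).flatMap (fun c => (nsOf c).map (fun n => (c, n)))).foldl pvSweepStep (out, none)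
    = (out ++ pvOpen c (nsOf c) ++ cs.flatMap (fun c' => "]," :: pvOpen c' (nsOf c')),
       some (cs.getLastD c)) := by
  rw [List.flatMap_cons, List.foldl_append,
    sweep_group c (nsOf c) out none (by simp) (hns c List.mem_cons_self), if_pos rfl]
  rw [sweep_from_some nsOf cs c _ (fun c' hc' => hns c' (List.mem_cons_of_mem c hc'))
    (fun c' hc' => (List.pairwise_cons.1 hpair).1 c' hc') (List.pairwise_cons.1 hpair).2]
  simp [List.append_assoc]

-- closing brackets shifted: the flat block list both snippets produce
theorem blocks_shift (nsOf : String → List String) (c : String) (cs : List String) :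
    pvOpen c (nsOf c) ++ cs.flatMap (fun c' => "]," :: pvOpen c' (nsOf c')) ++ ["],"]
    = (c :: cs).flatMap (fun c' => pvOpen c' (nsOf c') ++ ["],"]) := by
  induction cs generalizing c with
  | nil => simp
  | cons c2 cs ih =>
    conv_rhs => rw [List.flatMap_cons, ← ih c2]
    simp [List.append_assoc]

theorem pvFlatMapSingleton {α β : Type} (l : List α) (f : α → β) :
    l.flatMap (fun x => [f x]) = l.map f := by
  induction l with
  | nil => rfl
  | cons x l ih => rw [List.flatMap_cons, ih]; rfl

-- ---- A's fold, characterised ----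

theorem A_fold (L : List (String × List String)) (init : List String) :
    L.foldl (fun lines p =>
      ((PySem.List.sorted p.2 (fun a => a) false).foldl
        (fun ls a_ => ls ++ ["    \"" ++ a_ ++ "\",  # NEW (auto-classified)"])
        ((lines ++ ["\"" ++ p.1 ++ "\": ["]) ++ ["    ...,  # existing aliases"]))
      ++ ["],"]) init
    = init ++ L.flatMap (fun p => pvOpen p.1 (PySem.List.sorted p.2 (fun a => a) false) ++ ["],"]) := by
  induction L generalizing init with
  | nil => simp
  | cons p L ih =>
    rw [List.foldl_cons, ih, List.flatMap_cons]
    rw [PySem.List.foldl_append_eq_flatMap (fun a_ => ["    \"" ++ a_ ++ "\",  # NEW (auto-classified)"])]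
    have hmap : (PySem.List.sorted p.2 (fun a => a) false).flatMap
        (fun a_ => ["    \"" ++ a_ ++ "\",  # NEW (auto-classified)"])
        = (PySem.List.sorted p.2 (fun a => a) false).map pvAlias :=
      pvFlatMapSingleton _ pvAlias
    rw [hmap]
    simp [pvOpen, List.append_assoc]


-- A's grouping dict, characterised: its sorted item list is the sorted distinct canonicals,
-- each paired with the names of its records in merge-list order
theorem sorted_items_grouping (ms : List (List (String × String))) :
    PySem.List.sorted
      (ms.foldl
        (fun d item => d.modify (pyKeyD item "canonical") [] (fun l => l ++ [pyKeyD item "name"]))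
        PySem.Dict.empty).items (fun p => p.1) false
    = (PySem.List.sorted (PySem.Set.ofList (ms.map (fun item => pyKeyD item "canonical")))
        (fun c => c) false).map
        (fun c => (c, (ms.filter (fun item => pyKeyD item "canonical" == c)).map
          (fun item => pyKeyD item "name"))) := by
  set can : List (String × String) → String := fun item => pyKeyD item "canonical" with hcan
  set nm : List (String × String) → String := fun item => pyKeyD item "name" with hnm
  set D := ms.foldl (fun d item => d.modify (can item) [] (fun l => l ++ [nm item]))
      PySem.Dict.empty with hD
  have hkeys : D.keys = PySem.Set.ofList (ms.map can) := by
    rw [hD, PySem.Dict.keys_foldl_modify_key, PySem.Dict.keys_empty, PySem.Set.update_nil_left]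
  have hnodup : D.keys.Nodup := by rw [hkeys]; exact PySem.Set.nodup_ofList _
  have hgetD : ∀ c, D.getD c [] = (ms.filter (fun item => can item == c)).map nm := by
    intro c
    have hf : D = (ms.map (fun item => (can item, nm item))).foldl
        (fun d p => d.modify p.1 [] (fun l => l ++ [p.2])) PySem.Dict.empty := by
      rw [hD, List.foldl_map]
    rw [hf, PySem.Dict.getD_foldl_modify_append, PySem.Dict.getD_empty]
    simp [List.filter_map, List.map_map, Function.comp_def]
  have hitems : D.items
      = (PySem.Set.ofList (ms.map can)).map
          (fun c => (c, (ms.filter (fun item => can item == c)).map nm)) := by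
    rw [PySem.Dict.items_eq_map_keys D hnodup [], hkeys]
    exact List.map_congr_left (fun c _ => by rw [hgetD c])
  apply PySem.List.sorted_eq_of_perm_of_pairwise_lt
  · exact (hitems ▸
      (PySem.List.sorted_perm (xs := PySem.Set.ofList (ms.map can)) (key := fun c => c)
        (rev := false)).map _)
  · exact List.Pairwise.map _ (fun a b h => h)
      (PySem.List.sorted_ofList_pairwise_lt (xs := ms.map can))

-- the two snippet bodies agree on a non-empty merge list
theorem pv_core (ms : List (List (String × String))) (hms : ms ≠ []) (header : List String) :
    PySem.Str.join "\n"
      ((PySem.List.sorted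
          (ms.foldl (fun d item => d.modify (pyKeyD item "canonical") []
              (fun l => l ++ [pyKeyD item "name"])) PySem.Dict.empty).items
          (fun p => p.1) false).foldl
        (fun lines p =>
          ((PySem.List.sorted p.2 (fun a => a) false).foldl
            (fun ls a_ => ls ++ ["    \"" ++ a_ ++ "\",  # NEW (auto-classified)"])
            ((lines ++ ["\"" ++ p.1 ++ "\": ["]) ++ ["    ...,  # existing aliases"]))
          ++ ["],"]) header)
    = PySem.Str.join "\n"
      (((PySem.List.sorted2
            (ms.map (fun item => (pyKeyD item "canonical", pyKeyD item "name")))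
            (fun p => p.1) (fun p => p.2) false).foldl pvSweepStep (header, none)).1
        ++ ["],"]) := by
  congr 1
  rw [sorted_items_grouping ms, A_fold, List.flatMap_map]
  rw [sorted2_grouped]
  have hfst : (ms.map (fun item => (pyKeyD item "canonical", pyKeyD item "name"))).map Prod.fst
      = ms.map (fun i => pyKeyD i "canonical") := by
    rw [List.map_map]; rfl
  have hfilters : ∀ c : String,
      ((ms.map (fun item => (pyKeyD item "canonical", pyKeyD item "name"))).filter
          (fun p => p.1 == c)).map Prod.snd
      = (ms.filter (fun i => pyKeyD i "canonical" == c)).map (fun i => pyKeyD i "name") := by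
    intro c
    rw [List.filter_map, List.map_map]; rfl
  rw [hfst]
  simp only [hfilters]
  obtain ⟨c0, cs', hcs⟩ : ∃ c0 cs',
      PySem.List.sorted (PySem.Set.ofList (ms.map (fun i => pyKeyD i "canonical")))
        (fun x => x) false = c0 :: cs' := by
    cases hsrt : PySem.List.sorted
        (PySem.Set.ofList (ms.map (fun i => pyKeyD i "canonical"))) (fun x => x) false with
    | nil =>
      exfalso
      obtain ⟨i, his⟩ : ∃ i, i ∈ ms := by
        cases ms with
        | nil => exact absurd rfl hms
        | cons i ms => exact ⟨i, List.mem_cons_self⟩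
      have : pyKeyD i "canonical" ∈ PySem.List.sorted
          (PySem.Set.ofList (ms.map (fun i => pyKeyD i "canonical"))) (fun x => x) false := by
        rw [PySem.List.mem_sorted, PySem.Set.mem_ofList]
        exact List.mem_map_of_mem his
      rw [hsrt] at this
      exact List.not_mem_nil this
    | cons c0 cs' => exact ⟨c0, cs', rfl⟩
  have hmem : ∀ c' ∈ c0 :: cs', ∃ i ∈ ms, pyKeyD i "canonical" = c' := by
    intro c' hc'
    rw [← hcs, PySem.List.mem_sorted, PySem.Set.mem_ofList] at hc'
    obtain ⟨i, his, hi⟩ := List.mem_map.1 hc'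
    exact ⟨i, his, hi⟩
  have hns : ∀ c' ∈ c0 :: cs',
      (fun c => PySem.List.sorted
          ((ms.filter (fun i => pyKeyD i "canonical" == c)).map (fun i => pyKeyD i "name"))
          (fun a => a) false) c' ≠ [] := by
    intro c' hc' hnil
    obtain ⟨i, his, hi⟩ := hmem c' hc'
    rw [PySem.List.sorted_eq_nil_iff, List.map_eq_nil_iff] at hnil
    have : i ∈ ms.filter (fun i => pyKeyD i "canonical" == c') :=
      List.mem_filter.2 ⟨his, by simp [hi]⟩
    rw [hnil] at this
    exact List.not_mem_nil this
  have hpair : (c0 :: cs').Pairwise (· ≠ ·) := by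
    rw [← hcs]
    exact (PySem.List.sorted_ofList_pairwise_lt _).imp (fun h => ne_of_lt h)
  rw [hcs, sweep_from_none _ c0 cs' header hns hpair]
  rw [← blocks_shift]
  simp [List.append_assoc]

-- ===== VERDICT (by name: the statement is the Claim_ definition above) =====
theorem generate_alias_suggestions_spec : Claim_equal_generate_alias_suggestions := by
  intro classified entity_type _ _
  unfold Spec_generate_alias_suggestions generate_alias_suggestions generate_alias_suggestions_alt
  show (if _ = _ then _ else _) = (if _ = _ then _ else _)
  split
  · rfl
  · rename_i hms
    exact pv_core _ hms _
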